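-- pv_equiv track=rewrite | github.com/yhchen-tsinghua/stealthy-bgp-hijacking | artefact/performance-evaluation/reproduce.py | equally_best_nexthop
-- ===== SOURCE A (Python) =====
-- P2C = -1
--
-- def equally_best_nexthop(working_rib, best_from_rel=P2C):
--     best_length = float("inf")
--     ties = []
--     for ngbr in working_rib.keys():
--         as_path, from_rel = working_rib[ngbr]
--         if from_rel == best_from_rel:
--             length = len(as_path)
--             if length == best_length:
--                 ties.append(ngbr)
--             elif length < best_length:
--                 ties = [ngbr]
--                 best_length = length
--         elif from_rel > best_from_rel:
--             ties = [ngbr]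
--             best_from_rel = from_rel
--             best_length = len(as_path)
--     return ties
-- ===== SOURCE B (Python) =====
-- P2C = -1
--
-- def equally_best_nexthop(working_rib, best_from_rel=P2C):
--     cand = [(ngbr, as_path, from_rel)
--             for ngbr, (as_path, from_rel) in working_rib.items()
--             if from_rel >= best_from_rel]
--     if not cand:
--         return []
--     max_rel = max(from_rel for _, _, from_rel in cand)
--     min_len = min(len(as_path) for _, as_path, from_rel in cand
--                   if from_rel == max_rel)
--     return [ngbr for ngbr, as_path, from_rel in cand
--             if from_rel == max_rel and len(as_path) == min_len]
-- ===== Notes on version B (the rewrite author's own statement) =====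
-- stated objective: simpler
-- what changed: Replaced A's fused single-pass accumulator (mutable running best relation, running best length and a ties list rebuilt on resets) by three plain reductions: filter the candidates with from_rel >= best_from_rel, take max relation, take min path length among the max-relation ones, and emit the qualifying neighbours in dict order.
import Mathlib
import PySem

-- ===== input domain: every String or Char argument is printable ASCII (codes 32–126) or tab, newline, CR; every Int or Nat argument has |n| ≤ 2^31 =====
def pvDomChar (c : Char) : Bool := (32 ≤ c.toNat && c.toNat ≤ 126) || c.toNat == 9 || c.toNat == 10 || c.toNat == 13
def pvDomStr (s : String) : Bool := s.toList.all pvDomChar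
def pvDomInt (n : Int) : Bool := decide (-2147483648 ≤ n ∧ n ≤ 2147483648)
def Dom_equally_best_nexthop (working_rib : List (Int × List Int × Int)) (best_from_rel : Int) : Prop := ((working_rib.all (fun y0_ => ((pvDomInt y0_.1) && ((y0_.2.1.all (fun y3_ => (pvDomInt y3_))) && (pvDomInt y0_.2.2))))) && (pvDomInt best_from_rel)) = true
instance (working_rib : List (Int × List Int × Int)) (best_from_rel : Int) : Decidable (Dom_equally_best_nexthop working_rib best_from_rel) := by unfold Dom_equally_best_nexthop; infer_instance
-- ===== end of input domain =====

-- B replaces A's fused single-pass accumulator with separate filter / max / min reductions; objective: simpler.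

-- ===== PORT A =====
-- A's loop body: state = (best_from_rel, best_length (none = float("inf")), ties)
def ebnStep (st : Int × Option Int × List Int) (ngbr : Int) (as_path : List Int) (from_rel : Int) :
    Int × Option Int × List Int :=
  if from_rel == st.1 then
    let length : Int := as_path.length
    match st.2.1 with
    | none => (st.1, some length, [ngbr])
    | some bl =>
      if length == bl then (st.1, some bl, st.2.2 ++ [ngbr])
      else if length < bl then (st.1, some length, [ngbr])
      else st
  else if from_rel > st.1 then (from_rel, some (as_path.length : Int), [ngbr])
  else st

def equally_best_nexthop (working_rib : List (Int × List Int × Int)) (best_from_rel : Int) : List Int :=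
  let d : PySem.Dict Int (List Int × Int) := PySem.Dict.ofList working_rib
  (((PySem.Dict.keys d).foldl (fun st ngbr =>
      match PySem.Dict.get? d ngbr with
      | some pr => ebnStep st ngbr pr.1 pr.2
      | none => st)
    (best_from_rel, (none : Option Int), ([] : List Int)))).2.2

-- ===== PORT B =====
def equally_best_nexthop_alt (working_rib : List (Int × List Int × Int)) (best_from_rel : Int) : List Int :=
  let d : PySem.Dict Int (List Int × Int) := PySem.Dict.ofList working_rib
  let cand := d.items.filter (fun x => decide (best_from_rel ≤ x.2.2))
  if cand.isEmpty then []
  else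
    match PySem.List.max? (cand.map (fun x => x.2.2)) (fun r => r) with
    | none => []
    | some max_rel =>
      match PySem.List.min? ((cand.filter (fun x => x.2.2 == max_rel)).map
              (fun x => (x.2.1.length : Int))) (fun n => n) with
      | none => []
      | some min_len =>
        (cand.filter (fun x => x.2.2 == max_rel && (x.2.1.length : Int) == min_len)).map (fun x => x.1)

-- ===== PRECONDITION & SPEC =====
def Spec_equally_best_nexthop (working_rib : List (Int × List Int × Int)) (best_from_rel : Int) (out : List Int) : Prop := out = equally_best_nexthop_alt working_rib best_from_rel
instance (working_rib : List (Int × List Int × Int)) (best_from_rel : Int) (out : List Int) : Decidable (Spec_equally_best_nexthop working_rib best_from_rel out) := by unfold Spec_equally_best_nexthop; infer_instance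

-- ===== CLAIM (what is proved, stated in full; the proofs are below) =====
def Claim_equal_equally_best_nexthop : Prop := ∀ (working_rib : List (Int × List Int × Int)) (best_from_rel : Int), Dom_equally_best_nexthop working_rib best_from_rel → Spec_equally_best_nexthop working_rib best_from_rel (equally_best_nexthop working_rib best_from_rel)

-- ===== LEMMAS AND PROOFS =====
lemma min?_id_append (ys : List Int) (a : Int) :
    PySem.List.min? (ys ++ [a]) (fun n => n)
      = some ((PySem.List.min? ys (fun n => n)).elim a (fun m => min m a)) := by
  cases ys with
  | nil => simp [PySem.List.min?]
  | cons y t => simp [PySem.List.min?_id_cons, List.foldl_append]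

def ebnM (t : Int) (l : List (Int × List Int × Int)) : Int :=
  l.foldl (fun m x => max m x.2.2) t

lemma ebnM_le (l : List (Int × List Int × Int)) : ∀ t : Int, (∀ y ∈ l, y.2.2 ≤ t) → ebnM t l = t := by
  induction l with
  | nil => intro t _; rfl
  | cons y l ih =>
    intro t h
    have h1 : y.2.2 ≤ t := h y (by simp)
    have : max t y.2.2 = t := by omega
    simp only [ebnM, List.foldl_cons, this]
    exact ih t (fun z hz => h z (by simp [hz]))

lemma ebnM_mem (l : List (Int × List Int × Int)) : ∀ t : Int, ebnM t l = t ∨ ∃ y ∈ l, y.2.2 = ebnM t l := by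
  induction l with
  | nil => intro t; left; rfl
  | cons y l ih =>
    intro t
    simp only [ebnM, List.foldl_cons]
    rcases ih (max t y.2.2) with h | ⟨z, hz, he⟩
    · simp only [ebnM] at h
      by_cases hle : y.2.2 ≤ t
      · left; rw [h]; omega
      · right; exact ⟨y, by simp, by rw [h]; omega⟩
    · right; exact ⟨z, by simp [hz], he⟩

lemma ebnM_lb (t : Int) (l : List (Int × List Int × Int)) :
    t ≤ ebnM t l ∧ ∀ y ∈ l, y.2.2 ≤ ebnM t l :=
  PySem.List.le_foldl_max_int l (fun y => y.2.2) t

lemma ebnM_filter (t : Int) (l : List (Int × List Int × Int)) :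
    ebnM t (l.filter (fun x => decide (t ≤ x.2.2))) = ebnM t l := by
  apply le_antisymm
  · rcases ebnM_mem (l.filter (fun x => decide (t ≤ x.2.2))) t with h | ⟨y, hy, he⟩
    · rw [h]; exact (ebnM_lb t l).1
    · rw [← he]; exact (ebnM_lb t l).2 y (List.mem_of_mem_filter hy)
  · rcases ebnM_mem l t with h | ⟨y, hy, he⟩
    · rw [h]; exact (ebnM_lb t _).1
    · rw [← he]
      by_cases hty : t ≤ y.2.2
      · exact (ebnM_lb t _).2 y (List.mem_filter.mpr ⟨hy, by simpa⟩)
      · have := (ebnM_lb t (l.filter (fun x => decide (t ≤ x.2.2)))).1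
        omega


def ebnL (t : Int) (l : List (Int × List Int × Int)) : Option Int :=
  PySem.List.min? ((l.filter (fun x => x.2.2 == ebnM t l)).map (fun x => (x.2.1.length : Int))) (fun n => n)

def ebnT (t : Int) (l : List (Int × List Int × Int)) : List Int :=
  (l.filter (fun x => x.2.2 == ebnM t l && some (x.2.1.length : Int) == ebnL t l)).map (fun x => x.1)

theorem ebn_char (t : Int) (l : List (Int × List Int × Int)) :
    l.foldl (fun st x => ebnStep st x.1 x.2.1 x.2.2) (t, (none : Option Int), ([] : List Int))
      = (ebnM t l, ebnL t l, ebnT t l) := by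
  induction l using List.reverseRecOn with
  | nil => simp [ebnM, ebnL, ebnT, PySem.List.min?]
  | append_singleton l x ih =>
    obtain ⟨k, p, r⟩ := x
    have hM : ebnM t (l ++ [(k, p, r)]) = max (ebnM t l) r := by
      simp [ebnM, List.foldl_append]
    have hub := (ebnM_lb t l).2
    rw [List.foldl_append, ih]
    simp only [List.foldl_cons, List.foldl_nil]
    rcases lt_trichotomy r (ebnM t l) with hr | hr | hr
    · -- r below the running best: everything unchanged
      have hM' : ebnM t (l ++ [(k, p, r)]) = ebnM t l := by rw [hM]; omega
      have hstep : ebnStep (ebnM t l, ebnL t l, ebnT t l) k p r = (ebnM t l, ebnL t l, ebnT t l) := by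
        simp only [ebnStep]
        rw [if_neg (by simp; omega), if_neg (by omega)]
      rw [hstep, hM']
      have hfL : (l ++ [(k, p, r)]).filter (fun x => x.2.2 == ebnM t l)
          = l.filter (fun x => x.2.2 == ebnM t l) := by
        simp [List.filter_append]; omega
      have hL' : ebnL t (l ++ [(k, p, r)]) = ebnL t l := by
        simp only [ebnL, hM', hfL]
      rw [hL']
      simp only [ebnT, hM', hL', List.filter_append]
      simp; omega
    · -- r equals the running best: compete on length
      have hM' : ebnM t (l ++ [(k, p, r)]) = ebnM t l := by rw [hM]; omega
      have hfL : (l ++ [(k, p, r)]).filter (fun x => x.2.2 == ebnM t l)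
          = l.filter (fun x => x.2.2 == ebnM t l) ++ [(k, p, r)] := by
        simp [List.filter_append, hr]
      have hL' : ebnL t (l ++ [(k, p, r)])
          = some ((ebnL t l).elim (p.length : Int) (fun m => min m (p.length : Int))) := by
        simp only [ebnL, hM', hfL, List.map_append, List.map_cons, List.map_nil]
        exact min?_id_append _ _
      cases hL : ebnL t l with
      | none =>
        have hfnil : l.filter (fun x => x.2.2 == ebnM t l) = [] := by
          have := (PySem.List.min?_eq_none_iff (xs := (l.filter (fun x => x.2.2 == ebnM t l)).map (fun x => (x.2.1.length : Int))) (key := fun n => n)).mp (by rw [← ebnL]; exact hL)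
          simpa using this
        have hstep : ebnStep (ebnM t l, none, ebnT t l) k p r
            = (ebnM t l, some (p.length : Int), [k]) := by
          simp only [ebnStep]
          rw [if_pos (by simp [hr])]
        rw [hstep, hM', hL', hL]
        simp only [Option.elim, Prod.mk.injEq]
        refine ⟨trivial, trivial, ?_⟩
        simp only [ebnT, hM', hL', hL, Option.elim, List.filter_append]
        have : l.filter (fun x => x.2.2 == ebnM t l && some (x.2.1.length : Int) == some (p.length : Int)) = [] := by
          rw [List.filter_eq_nil_iff]
          intro y hy hc
          have : y ∈ l.filter (fun x => x.2.2 == ebnM t l) := by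
            simp only [List.mem_filter]
            exact ⟨hy, by simp at hc; simp [hc.1]⟩
          simp [hfnil] at this
        rw [this]
        simp [hr]
      | some m =>
        have hmin : ∀ y ∈ (l.filter (fun x => x.2.2 == ebnM t l)).map (fun x => (x.2.1.length : Int)), m ≤ y := by
          intro y hy
          exact PySem.List.min?_isMin (by rw [← ebnL]; exact hL) y hy
        have hstep0 : ebnStep (ebnM t l, some m, ebnT t l) k p r
            = if (p.length : Int) == m then (ebnM t l, some m, ebnT t l ++ [k])
              else if (p.length : Int) < m then (ebnM t l, some (p.length : Int), [k])
              else (ebnM t l, some m, ebnT t l) := by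
          simp only [ebnStep]
          rw [if_pos (by simp [hr])]
        rcases lt_trichotomy (p.length : Int) m with hn | hn | hn
        · -- strictly shorter: reset ties
          rw [hstep0, if_neg (by simpa using (by omega : ¬ (p.length : Int) = m)), if_pos hn, hM', hL', hL]
          simp only [Option.elim, Prod.mk.injEq]
          refine ⟨trivial, by rw [min_eq_right (by omega)], ?_⟩
          simp only [ebnT, hM', hL', hL, Option.elim, List.filter_append]
          rw [min_eq_right (by omega : (p.length : Int) ≤ m)]
          have : l.filter (fun x => x.2.2 == ebnM t l && some (x.2.1.length : Int) == some (p.length : Int)) = [] := by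
            rw [List.filter_eq_nil_iff]
            intro y hy hc
            simp only [Bool.and_eq_true, beq_iff_eq, Option.some.injEq] at hc
            have hym : m ≤ (y.2.1.length : Int) := by
              apply hmin
              simp only [List.mem_map]
              exact ⟨y, List.mem_filter.mpr ⟨hy, by simp [hc.1]⟩, rfl⟩
            omega
          rw [this]
          simp [hr]
        · -- equal: append to ties
          rw [hstep0, if_pos (by simpa using hn), hM', hL', hL]
          simp only [Option.elim, Prod.mk.injEq]
          refine ⟨trivial, by rw [hn, min_self], ?_⟩
          simp only [ebnT, hM', hL', hL, Option.elim, List.filter_append]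
          rw [hn, min_self]
          simp [hr, hn]
        · -- longer: ignored
          rw [hstep0, if_neg (by simpa using (by omega : ¬ (p.length : Int) = m)), if_neg (by omega), hM', hL', hL]
          simp only [Option.elim, Prod.mk.injEq]
          refine ⟨trivial, by rw [min_eq_left (by omega)], ?_⟩
          simp only [ebnT, hM', hL', hL, Option.elim, List.filter_append]
          rw [min_eq_left (by omega : m ≤ (p.length : Int))]
          simp [hr]
          omega
    · -- r beats the running best: reset
      have hM' : ebnM t (l ++ [(k, p, r)]) = r := by rw [hM]; omega
      have hstep : ebnStep (ebnM t l, ebnL t l, ebnT t l) k p r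
          = (r, some (p.length : Int), [k]) := by
        simp only [ebnStep]
        rw [if_neg (by simp; omega), if_pos (by omega)]
      have hfnil : l.filter (fun x => x.2.2 == r) = [] := by
        rw [List.filter_eq_nil_iff]
        intro y hy hc
        have := hub y hy
        simp only [beq_iff_eq] at hc
        omega
      have hL' : ebnL t (l ++ [(k, p, r)]) = some (p.length : Int) := by
        simp only [ebnL, hM', List.filter_append, hfnil]
        simp [PySem.List.min?]
      rw [hstep, hM', hL']
      simp only [Prod.mk.injEq]
      refine ⟨trivial, trivial, ?_⟩
      simp only [ebnT, hM', hL', List.filter_append]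
      have : l.filter (fun x => x.2.2 == r && some (x.2.1.length : Int) == some (p.length : Int)) = [] := by
        rw [List.filter_eq_nil_iff]
        intro y hy hc
        have := hub y hy
        simp only [Bool.and_eq_true, beq_iff_eq] at hc
        omega
      rw [this]
      simp



-- A's keys-then-lookup loop is the loop over the items of the same dict
lemma keys_fold_eq_items_fold (d : PySem.Dict Int (List Int × Int)) (hnd : d.keys.Nodup)
    (init : Int × Option Int × List Int) :
    (d.keys.foldl (fun st ngbr =>
        match PySem.Dict.get? d ngbr with
        | some pr => ebnStep st ngbr pr.1 pr.2
        | none => st) init)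
      = d.items.foldl (fun st x => ebnStep st x.1 x.2.1 x.2.2) init := by
  have hk : d.keys = d.items.map (fun p => p.1) := rfl
  rw [hk, List.foldl_map]
  apply PySem.List.foldl_congr_mem
  intro acc x hx
  have : PySem.Dict.get? d x.1 = some x.2 := PySem.Dict.get?_of_mem_items d (by exact hx) hnd
  rw [this]

lemma main_eq (working_rib : List (Int × List Int × Int)) (best_from_rel : Int) :
    equally_best_nexthop working_rib best_from_rel = equally_best_nexthop_alt working_rib best_from_rel := by
  dsimp only [equally_best_nexthop, equally_best_nexthop_alt]
  set d := PySem.Dict.ofList working_rib with hd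
  set l := d.items with hl
  set t := best_from_rel with ht
  rw [keys_fold_eq_items_fold d (PySem.Dict.nodup_keys_ofList working_rib) _, ebn_char]
  set cand := l.filter (fun x => decide (t ≤ x.2.2)) with hcand
  -- the maximum over l seeded with t is the maximum over cand
  have hMf : ebnM t cand = ebnM t l := ebnM_filter t l
  cases hc : cand with
  | nil =>
    -- no candidate: every relation is below t
    have hall : ∀ y ∈ l, y.2.2 < t := by
      intro y hy
      by_contra hcon
      have : y ∈ cand := List.mem_filter.mpr ⟨hy, by simp; omega⟩
      simp [hc] at this
    have hMt : ebnM t l = t := ebnM_le l t (fun y hy => le_of_lt (hall y hy))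
    have hfnil : l.filter (fun x => x.2.2 == ebnM t l) = [] := by
      rw [List.filter_eq_nil_iff]
      intro y hy hcb
      simp only [beq_iff_eq] at hcb
      have := hall y hy
      omega
    simp only [List.isEmpty_nil, if_pos, ebnT]
    rw [← hl, List.map_eq_nil_iff, List.filter_eq_nil_iff]
    intro y hy hcb
    simp only [Bool.and_eq_true, beq_iff_eq] at hcb
    obtain ⟨h1, _⟩ := hcb
    rw [hMt] at h1
    have := hall y hy
    omega
  | cons c cs =>
    have htM : t ≤ ebnM t l := (ebnM_lb t l).1
    have hcands : ∀ y ∈ cand, y ∈ l ∧ t ≤ y.2.2 := by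
      intro y hy
      have := List.mem_filter.mp (hcand ▸ hy)
      exact ⟨this.1, by simpa using this.2⟩
    have hcfirst := hcands c (by rw [hc]; simp)
    -- the maximum of the candidate relations is ebnM t l
    have hMc : cs.foldl (fun m x => max m x.2.2) c.2.2 = ebnM t l := by
      rw [← hMf, hc]
      simp only [ebnM, List.foldl_cons]
      have : max t c.2.2 = c.2.2 := by omega
      rw [this]
    have hMax : PySem.List.max? ((c :: cs).map (fun x => x.2.2)) (fun r => r)
        = some (ebnM t l) := by
      rw [List.map_cons, PySem.List.max?_id_cons, List.foldl_map, hMc]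
    -- filtering candidates down to the best relation forgets the threshold filter
    have hff : (c :: cs).filter (fun x => x.2.2 == ebnM t l)
        = l.filter (fun x => x.2.2 == ebnM t l) := by
      rw [← hc, hcand, List.filter_filter]
      apply List.filter_congr
      intro y hy
      by_cases hyM : y.2.2 = ebnM t l
      · simp [hyM]; omega
      · simp [hyM]
    -- some best-relation candidate exists, so the min is a `some`
    have hex : ∃ y ∈ l, y.2.2 = ebnM t l := by
      rcases ebnM_mem cand t with h0 | ⟨y, hy, he⟩
      · refine ⟨c, hcfirst.1, ?_⟩
        rw [hMf] at h0
        have h2 := (ebnM_lb t cand).2 c (by rw [hc]; simp)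
        rw [hMf] at h2
        omega
      · exact ⟨y, (hcands y hy).1, by rw [he, hMf]⟩
    cases hm : ebnL t l with
    | none =>
      exfalso
      have hfn : l.filter (fun x => x.2.2 == ebnM t l) = [] := by
        have := (PySem.List.min?_eq_none_iff (xs := (l.filter (fun x => x.2.2 == ebnM t l)).map (fun x => (x.2.1.length : Int))) (key := fun n => n)).mp (by rw [← ebnL]; exact hm)
        simpa using this
      obtain ⟨y, hy, he⟩ := hex
      have : y ∈ l.filter (fun x => x.2.2 == ebnM t l) := List.mem_filter.mpr ⟨hy, by simp [he]⟩
      simp [hfn] at this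
    | some m =>
      have hMin : PySem.List.min? (((c :: cs).filter (fun x => x.2.2 == ebnM t l)).map
          (fun x => (x.2.1.length : Int))) (fun n => n) = some m := by
        rw [hff, ← ebnL, hm]
      simp only [List.isEmpty_cons, if_neg, Bool.false_eq_true, not_false_eq_true, hMax, hMin]
      simp only [ebnT, hm, ← hl]
      rw [← hc, hcand, List.filter_filter]
      have : List.filter (fun y => (y.2.2 == ebnM t l && (y.2.1.length : Int) == m) && decide (t ≤ y.2.2)) l
          = List.filter (fun y => y.2.2 == ebnM t l && some (y.2.1.length : Int) == some m) l := by
        apply List.filter_congr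
        intro y hy
        by_cases hyM : y.2.2 = ebnM t l
        · by_cases hym : (y.2.1.length : Int) = m
          · simp [hyM, hym]; omega
          · simp [hyM, hym]
        · simp [hyM]
      rw [this]

-- ===== VERDICT (by name: the statement is the Claim_ definition above) =====
theorem equally_best_nexthop_spec : Claim_equal_equally_best_nexthop := by
  intro working_rib best_from_rel _
  unfold Spec_equally_best_nexthop
  exact main_eq working_rib best_from_rel
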